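-- pv_equiv track=rewrite | github.com/WSEmma/Car-detecting | check_rglight.py | findTop
-- ===== SOURCE A (Python) =====
-- def findTop(pt,Tg1,Tg2,gray):
--     n = pt[1] - 1
--     if n >= 0:
--         gs = gray[n][pt[0]]
--         point = (pt[0],n)
--         if(gs < Tg1):
--             n = findTop(point,Tg1,Tg2,gray)
--         elif(gs < Tg2):
--             n= findTop(point,Tg1,Tg2,gray)
--         else:
--             n = pt[1]
--     else:
--         n = pt[1]
--     return n
-- ===== SOURCE B (Python) =====
-- def findTop(pt, Tg1, Tg2, gray):
--     x, y = pt
--     T = max(Tg1, Tg2)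
--     while y - 1 >= 0 and gray[y - 1][x] < T:
--         y -= 1
--     return y
-- ===== Notes on version B (the rewrite author's own statement) =====
-- stated objective: simpler
-- what changed: The double tail recursion with its redundant if/elif branches is replaced by an explicit while loop over the current row y with the two thresholds collapsed into one bound max(Tg1, Tg2).
import Mathlib
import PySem

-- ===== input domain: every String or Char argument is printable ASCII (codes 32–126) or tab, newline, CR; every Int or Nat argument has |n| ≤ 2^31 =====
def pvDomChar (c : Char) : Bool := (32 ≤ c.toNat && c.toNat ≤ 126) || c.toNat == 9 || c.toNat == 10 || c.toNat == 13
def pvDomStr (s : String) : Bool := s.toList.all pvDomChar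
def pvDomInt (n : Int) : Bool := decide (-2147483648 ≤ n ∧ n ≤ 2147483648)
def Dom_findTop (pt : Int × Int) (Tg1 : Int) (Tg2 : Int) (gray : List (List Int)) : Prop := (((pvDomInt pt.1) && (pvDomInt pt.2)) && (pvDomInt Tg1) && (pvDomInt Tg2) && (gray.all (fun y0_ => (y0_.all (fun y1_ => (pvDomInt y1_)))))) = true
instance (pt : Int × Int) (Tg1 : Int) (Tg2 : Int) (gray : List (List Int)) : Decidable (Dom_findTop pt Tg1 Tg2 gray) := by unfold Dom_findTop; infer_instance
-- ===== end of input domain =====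

-- B replaces A's double tail recursion (with its redundant if/elif branches) by an
-- explicit while loop over the current row, collapsing the two thresholds into max(Tg1,Tg2): simpler.

-- ===== PORT A =====
def findTop (pt : Int × Int) (Tg1 : Int) (Tg2 : Int) (gray : List (List Int)) : Int :=
  let n := pt.2 - 1
  if _h : n ≥ 0 then
    -- gray[n][pt[0]]; getD defaults are only reached where Python raises (outside Pre_)
    let gs := PySem.List.pyGetD (PySem.List.pyGetD gray n []) pt.1 0
    let point := (pt.1, n)
    if gs < Tg1 then findTop point Tg1 Tg2 gray
    else if gs < Tg2 then findTop point Tg1 Tg2 gray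
    else pt.2
  else pt.2
termination_by pt.2.toNat
decreasing_by all_goals { show (pt.2 - 1).toNat < pt.2.toNat; omega }

-- ===== PORT B =====
-- the while loop of Source B: walks y downward while the pixel above is below the threshold
def findTopAltGo (gray : List (List Int)) (x : Int) (T : Int) (y : Int) : Int :=
  if h : y - 1 ≥ 0 ∧ PySem.List.pyGetD (PySem.List.pyGetD gray (y - 1) []) x 0 < T then
    findTopAltGo gray x T (y - 1)
  else y
termination_by y.toNat
decreasing_by have := h.1; omega

def findTop_alt (pt : Int × Int) (Tg1 : Int) (Tg2 : Int) (gray : List (List Int)) : Int :=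
  findTopAltGo gray pt.1 (max Tg1 Tg2) pt.2

-- ===== PRECONDITION & SPEC =====
-- Pre_ excludes exactly the inputs on which A raises IndexError: a row n below pt[1] is
-- required to be a valid index (and pt[0] a valid Python index into it) only when the scan
-- actually reaches it, i.e. when every row strictly between n and pt[1] exists and holds a
-- pixel below max(Tg1,Tg2); inputs where A stops at a bright pixel earlier are admitted.
-- (the first conjunct excludes nothing extra: if pt[1] > len(gray) the very first access
-- gray[pt[1]-1] already raises)
def Pre_findTop (pt : Int × Int) (Tg1 : Int) (Tg2 : Int) (gray : List (List Int)) : Prop :=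
  pt.2.toNat ≤ gray.length ∧
  ∀ n : Nat, n < pt.2.toNat →
    (∀ m : Nat, m < pt.2.toNat → n < m →
      m < gray.length ∧
      -((gray.getD m []).length : Int) ≤ pt.1 ∧ pt.1 < ((gray.getD m []).length : Int) ∧
      PySem.List.pyGetD (gray.getD m []) pt.1 0 < max Tg1 Tg2) →
    n < gray.length ∧
    -((gray.getD n []).length : Int) ≤ pt.1 ∧ pt.1 < ((gray.getD n []).length : Int)
instance (pt : Int × Int) (Tg1 : Int) (Tg2 : Int) (gray : List (List Int)) : Decidable (Pre_findTop pt Tg1 Tg2 gray) := by unfold Pre_findTop; infer_instance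

def pvWitness_findTop : (Int × Int) × Int × Int × List (List Int) := ((0, 1), 3, 7, [[5]])

def Spec_findTop (pt : Int × Int) (Tg1 : Int) (Tg2 : Int) (gray : List (List Int)) (out : Int) : Prop := out = findTop_alt pt Tg1 Tg2 gray
instance (pt : Int × Int) (Tg1 : Int) (Tg2 : Int) (gray : List (List Int)) (out : Int) : Decidable (Spec_findTop pt Tg1 Tg2 gray out) := by unfold Spec_findTop; infer_instance

-- ===== CLAIM (what is proved, stated in full; the proofs are below) =====
def Claim_equal_findTop : Prop := ∀ (pt : Int × Int) (Tg1 : Int) (Tg2 : Int) (gray : List (List Int)), Dom_findTop pt Tg1 Tg2 gray → Pre_findTop pt Tg1 Tg2 gray → Spec_findTop pt Tg1 Tg2 gray (findTop pt Tg1 Tg2 gray)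

-- ===== LEMMAS AND PROOFS =====

-- A's recursion and B's loop agree at every starting row (the equality is in fact
-- unconditional for the total ports; Pre_ only delimits where the ports model Python).
lemma findTop_eq_go (Tg1 Tg2 x : Int) (gray : List (List Int)) :
    ∀ y : Int, findTop (x, y) Tg1 Tg2 gray = findTopAltGo gray x (max Tg1 Tg2) y := by
  have main : ∀ k : Nat, ∀ y : Int, y.toNat = k →
      findTop (x, y) Tg1 Tg2 gray = findTopAltGo gray x (max Tg1 Tg2) y := by
    intro k
    induction k using Nat.strong_induction_on with
    | _ k ih =>
      intro y hk
      rw [findTop, findTopAltGo]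
      simp only
      by_cases h1 : y - 1 ≥ 0
      · set gs := PySem.List.pyGetD (PySem.List.pyGetD gray (y - 1) []) x 0 with hgs
        by_cases h2 : gs < max Tg1 Tg2
        · have hrec : findTop (x, y - 1) Tg1 Tg2 gray
              = findTopAltGo gray x (max Tg1 Tg2) (y - 1) :=
            ih (y - 1).toNat (by omega) (y - 1) rfl
          rcases lt_max_iff.mp h2 with h | h
          · rw [dif_pos h1, if_pos h, dif_pos ⟨h1, h2⟩, hrec]
          · rw [dif_pos h1, dif_pos ⟨h1, h2⟩, ← hrec]
            by_cases h3 : gs < Tg1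
            · rw [if_pos h3]
            · rw [if_neg h3, if_pos h]
        · have h3 : ¬ gs < Tg1 := fun h => h2 (lt_max_iff.mpr (Or.inl h))
          have h4 : ¬ gs < Tg2 := fun h => h2 (lt_max_iff.mpr (Or.inr h))
          rw [dif_pos h1, if_neg h3, if_neg h4, dif_neg (by tauto)]
      · rw [dif_neg h1, dif_neg (by tauto)]
  exact fun y => main y.toNat y rfl

-- ===== VERDICT (by name: the statement is the Claim_ definition above) =====
theorem findTop_spec : Claim_equal_findTop := by
  intro pt Tg1 Tg2 gray _ _
  unfold Spec_findTop findTop_alt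
  simpa using findTop_eq_go Tg1 Tg2 pt.1 gray pt.2
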